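-- pv_equiv track=rewrite | github.com/mpralat/notesRecognizer | getting_lines.py | detect_chunks
-- ===== SOURCE A (Python) =====
-- LINES_DISTANCE_THRESHOLD = 20
--
-- def detect_chunks(all_lines):
--     chunks = []
--     lines = []
--     all_lines = sorted(all_lines)
--     for current_line in all_lines:
--         # If current line is far away from last detected line
--         if lines and abs(lines[-1] - current_line) > LINES_DISTANCE_THRESHOLD:
--             if len(lines) >= 5:
--                 # Consider it the start of the next chunk.
--                 # If <5 - not enough lines detected. Probably an anomaly - reject.
--                 chunks.append((lines[0], lines[-1]))
--             lines.clear()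
--         lines.append(current_line)
--
--     # Process the last line
--     if len(lines) >= 5:
--         if abs(lines[-2] - lines[-1]) <= LINES_DISTANCE_THRESHOLD:
--             chunks.append((lines[0], lines[-1]))
--     return chunks
-- ===== SOURCE B (Python) =====
-- LINES_DISTANCE_THRESHOLD = 20
--
-- def detect_chunks(all_lines):
--     s = sorted(all_lines)
--     n = len(s)
--     # cut positions: before index i+1 whenever the gap between neighbours exceeds the threshold
--     cuts = [0] + [i + 1 for i, (a, b) in enumerate(zip(s, s[1:]))
--                   if b - a > LINES_DISTANCE_THRESHOLD] + [n]
--     segments = [s[a:b] for a, b in zip(cuts, cuts[1:])]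
--     return [(seg[0], seg[-1]) for seg in segments if len(seg) >= 5]
-- ===== Notes on version B (the rewrite author's own statement) =====
-- stated objective: alternative
-- what changed: B replaces A's single stateful loop (running buffer of current lines, inline chunk emission, final flush with a redundant pair check) by a staged boundary/segment computation: it enumerates the adjacent pairs of the sorted list to get the cut positions where the gap exceeds the threshold, slices the sorted list at those cuts into explicit segments, and emits (first,last) of each segment of length >= 5 in a final filtering pass.
import Mathlib
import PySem

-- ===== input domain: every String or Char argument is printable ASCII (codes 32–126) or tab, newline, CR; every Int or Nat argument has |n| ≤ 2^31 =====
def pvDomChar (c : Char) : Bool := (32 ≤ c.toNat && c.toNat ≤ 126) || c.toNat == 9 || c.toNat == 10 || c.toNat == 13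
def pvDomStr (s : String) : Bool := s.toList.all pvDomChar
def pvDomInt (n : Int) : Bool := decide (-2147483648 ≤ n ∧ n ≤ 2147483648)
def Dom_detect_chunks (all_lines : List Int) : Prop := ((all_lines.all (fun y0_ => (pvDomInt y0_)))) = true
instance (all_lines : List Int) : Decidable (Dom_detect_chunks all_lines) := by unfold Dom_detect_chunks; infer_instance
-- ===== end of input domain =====

-- B computes explicit gap-boundary cut positions on the sorted list, slices it into
-- segments at those cuts, and filters the segments, instead of A's single stateful
-- loop with inline emission; objective: alternative (same asymptotic cost).

-- ===== PORT A =====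
-- one iteration of A's for-loop over the sorted list; state = (chunks, lines)
def pvStepA (st : List (Int × Int) × List Int) (current : Int) :
    List (Int × Int) × List Int :=
  match st.2.getLast? with
  | none => (st.1, st.2 ++ [current])
  | some l =>
    if 20 < (l - current).natAbs then
      ((if 5 ≤ st.2.length then st.1 ++ [(st.2.headD 0, l)] else st.1), [current])
    else (st.1, st.2 ++ [current])

-- A's trailing "process the last line" block (lines[-2]/lines[-1] via pyGet?,
-- only reached with length ≥ 5, so the defaults are never used)
def pvFinishA (st : List (Int × Int) × List Int) : List (Int × Int) :=
  if 5 ≤ st.2.length then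
    if ((PySem.List.pyGet? st.2 (-2)).getD 0 - (PySem.List.pyGet? st.2 (-1)).getD 0).natAbs ≤ 20 then
      st.1 ++ [(st.2.headD 0, st.2.getLastD 0)]
    else st.1
  else st.1

def detect_chunks (all_lines : List Int) : List (Int × Int) :=
  pvFinishA ((PySem.List.sorted all_lines (fun x => x) false).foldl pvStepA ([], []))

-- ===== PORT B =====
def detect_chunks_alt (all_lines : List Int) : List (Int × Int) :=
  let s := PySem.List.sorted all_lines (fun x => x) false
  let n : Int := (s.length : Int)
  -- cut positions: i+1 for each adjacent pair (a,b) = (s[i], s[i+1]) with b - a > 20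
  let cuts : List Int := 0 :: ((PySem.List.enumerate (s.zip s.tail) 0).filterMap
      (fun ip => if 20 < ip.2.2 - ip.2.1 then some (ip.1 + 1) else none)) ++ [n]
  let segments := (cuts.zip cuts.tail).map (fun ab => PySem.List.slice s (some ab.1) (some ab.2))
  segments.filterMap (fun seg => if 5 ≤ seg.length then some (seg.headD 0, seg.getLastD 0) else none)

-- ===== PRECONDITION & SPEC =====
def Spec_detect_chunks (all_lines : List Int) (out : List (Int × Int)) : Prop := out = detect_chunks_alt all_lines
instance (all_lines : List Int) (out : List (Int × Int)) : Decidable (Spec_detect_chunks all_lines out) := by unfold Spec_detect_chunks; infer_instance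

-- ===== CLAIM (what is proved, stated in full; the proofs are below) =====
def Claim_equal_detect_chunks : Prop := ∀ (all_lines : List Int), Dom_detect_chunks all_lines → Spec_detect_chunks all_lines (detect_chunks all_lines)

-- ===== LEMMAS AND PROOFS =====

-- B's final filtering pass, as a standalone function (proof convenience)
def pvEmitG (gs : List (List Int)) : List (Int × Int) :=
  gs.filterMap (fun seg => if 5 ≤ seg.length then some (seg.headD 0, seg.getLastD 0) else none)

-- B's internal cut positions, with an arbitrary enumeration start (for induction)
def pvInternalFrom (s : List Int) (k : Int) : List Int :=
  (PySem.List.enumerate (s.zip s.tail) k).filterMap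
    (fun ip => if 20 < ip.2.2 - ip.2.1 then some (ip.1 + 1) else none)

-- B's segment computation on an already-sorted list
def pvSegs (s : List Int) : List (List Int) :=
  let cuts : List Int := 0 :: pvInternalFrom s 0 ++ [(s.length : Int)]
  (cuts.zip cuts.tail).map (fun ab => PySem.List.slice s (some ab.1) (some ab.2))

-- reference grouping: maximal runs of the sorted list (cur = current run, nonempty)
def pvRuns : List Int → List Int → List (List Int)
  | cur, [] => [cur]
  | cur, x :: xs =>
    if x - cur.getLastD 0 ≤ 20 then pvRuns (cur ++ [x]) xs
    else cur :: pvRuns [x] xs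

lemma pvRuns_ne_nil (xs cur : List Int) : pvRuns cur xs ≠ [] := by
  induction xs generalizing cur with
  | nil => simp [pvRuns]
  | cons x xs ih =>
    simp only [pvRuns]
    split_ifs
    · exact ih _
    · simp

lemma pvRuns_flatten (xs cur : List Int) : (pvRuns cur xs).flatten = cur ++ xs := by
  induction xs generalizing cur with
  | nil => simp [pvRuns]
  | cons x xs ih =>
    simp only [pvRuns]
    split_ifs
    · rw [ih]; simp
    · simp [ih]

lemma pvRuns_ne_nil_mem (xs cur : List Int) (hcur : cur ≠ []) :
    ∀ g ∈ pvRuns cur xs, g ≠ [] := by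
  induction xs generalizing cur with
  | nil => simpa [pvRuns] using hcur
  | cons x xs ih =>
    simp only [pvRuns]
    split_ifs
    · exact ih _ (by simp)
    · intro g hg
      rcases List.mem_cons.mp hg with rfl | hg
      · exact hcur
      · exact ih [x] (by simp) g hg

lemma pvRuns_head (xs cur : List Int) (hcur : cur ≠ []) :
    ((pvRuns cur xs).headD []).headD 0 = cur.headD 0 := by
  induction xs generalizing cur with
  | nil => simp [pvRuns]
  | cons x xs ih =>
    simp only [pvRuns]
    split_ifs
    · rw [ih _ (by simp)]
      obtain ⟨a, t, rfl⟩ := List.exists_cons_of_ne_nil hcur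
      simp
    · simp

lemma pvRuns_chain (xs cur : List Int) (hcur : cur ≠ [])
    (hch : List.IsChain (fun a b => b - a ≤ 20) cur) :
    ∀ g ∈ pvRuns cur xs, List.IsChain (fun a b => b - a ≤ 20) g := by
  induction xs generalizing cur with
  | nil => simpa [pvRuns] using hch
  | cons x xs ih =>
    simp only [pvRuns]
    split_ifs with hgap
    · refine ih _ (by simp) ?_
      refine List.IsChain.append hch (by simp) ?_
      intro a ha b hb
      simp only [List.head?_cons, Option.mem_def, Option.some.injEq] at hb
      have hga : cur.getLast? = some a := Option.mem_def.mp ha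
      have hda : cur.getLastD 0 = a := by rw [List.getLastD_eq_getLast?, hga]; rfl
      subst hb
      omega
    · intro g hg
      rcases List.mem_cons.mp hg with rfl | hg
      · exact hch
      · exact ih [x] (by simp) (by simp) g hg
  
lemma pvRuns_boundary (xs cur : List Int) (hcur : cur ≠ []) :
    List.IsChain (fun g g' => 20 < g'.headD 0 - g.getLastD 0) (pvRuns cur xs) := by
  induction xs generalizing cur with
  | nil => simp [pvRuns]
  | cons x xs ih =>
    simp only [pvRuns]
    split_ifs with hgap
    · exact ih _ (by simp)
    · have hrec := ih [x] (by simp)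
      cases hr : pvRuns [x] xs with
      | nil => exact absurd hr (pvRuns_ne_nil _ _)
      | cons h rest =>
        rw [hr] at hrec
        refine List.isChain_cons_cons.mpr ⟨?_, hrec⟩
        have := pvRuns_head xs [x] (by simp)
        rw [hr] at this
        simp only [List.headD_cons] at this
        rw [this]
        omega
  
-- characterisation of membership in the adjacent-pairs list
lemma pv_mem_zip_adj {l : List Int} {p : Int × Int} (hp : p ∈ l.zip l.tail) :
    ∃ (i : Nat) (h1 : i < l.length) (h2 : i + 1 < l.length), p = (l[i], l[i + 1]) := by
  obtain ⟨i, hi, hget⟩ := List.mem_iff_getElem.mp hp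
  have hlen : (l.zip l.tail).length = min l.length l.tail.length := List.length_zip
  have hlt : i < l.tail.length := by
    simp [hlen] at hi; omega
  have h2 : i + 1 < l.length := by
    rcases l with _ | ⟨a, t⟩
    · simp at hlt
    · simp at hlt ⊢; omega
  refine ⟨i, by omega, h2, ?_⟩
  rw [← hget, List.getElem_zip, List.getElem_tail]

-- within a run (chain with gaps ≤ 20) there are no cut positions
lemma pv_internal_nil (g : List Int) (k : Int)
    (hch : List.IsChain (fun a b => b - a ≤ 20) g) :
    pvInternalFrom g k = [] := by
  unfold pvInternalFrom
  rw [List.filterMap_eq_nil_iff]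
  intro ip hip
  have hmem : ip.2 ∈ g.zip g.tail := by
    obtain ⟨j, hj, rfl⟩ := (PySem.List.mem_enumerate_iff _ _ _).mp hip
    exact List.getElem_mem _
  obtain ⟨i, h1, h2, hp⟩ := pv_mem_zip_adj hmem
  have hc := List.isChain_iff_getElem.mp hch i (by omega)
  have hle : ip.2.2 - ip.2.1 ≤ 20 := by
    rw [hp]
    simpa using hc
  rw [if_neg (by omega : ¬ (20 < ip.2.2 - ip.2.1))]

-- shifting the enumeration start shifts every cut position
lemma pv_internal_shift (t : List Int) (k : Int) :
    pvInternalFrom t k = (pvInternalFrom t 0).map (· + k) := by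
  unfold pvInternalFrom
  generalize t.zip t.tail = l
  have main : ∀ (l : List (Int × Int)) (a b : Int),
      (PySem.List.enumerate l a).filterMap
        (fun ip => if 20 < ip.2.2 - ip.2.1 then some (ip.1 + 1) else none)
      = ((PySem.List.enumerate l b).filterMap
        (fun ip => if 20 < ip.2.2 - ip.2.1 then some (ip.1 + 1) else none)).map (· + (a - b)) := by
    intro l
    induction l with
    | nil => intro a b; simp [PySem.List.enumerate_nil]
    | cons p l ih =>
      intro a b
      rw [PySem.List.enumerate_cons, PySem.List.enumerate_cons]
      by_cases h : 20 < p.2 - p.1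
      · simp only [List.filterMap_cons, if_pos h, List.map_cons]
        rw [ih (a + 1) (b + 1), show a + 1 - (b + 1) = a - b by ring]
        congr 1
        ring
      · simp only [List.filterMap_cons, if_neg h]
        rw [ih (a + 1) (b + 1), show a + 1 - (b + 1) = a - b by ring]
  have := main l k 0
  simpa using this

-- the adjacent-pairs list of g ++ t splits at the junction
lemma pv_zip_adj_append (g t : List Int) (hg : g ≠ []) (ht : t ≠ []) :
    (g ++ t).zip (g ++ t).tail
      = g.zip g.tail ++ (g.getLastD 0, t.headD 0) :: t.zip t.tail := by
  induction g with
  | nil => exact absurd rfl hg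
  | cons a g ih =>
    cases g with
    | nil =>
      obtain ⟨b, t', rfl⟩ := List.exists_cons_of_ne_nil ht
      simp
    | cons a' g' =>
      have hthis := ih (by simp)
      simp only [List.cons_append, List.tail_cons, List.zip_cons_cons] at hthis ⊢
      rw [hthis]
      simp

-- cut positions of g ++ t: one cut at |g|, then the cuts of t shifted by |g|
lemma pv_internal_append (g t : List Int) (hg : g ≠ []) (ht : t ≠ [])
    (hch : List.IsChain (fun a b => b - a ≤ 20) g)
    (hbd : 20 < t.headD 0 - g.getLastD 0) :
    pvInternalFrom (g ++ t) 0
      = (g.length : Int) :: (pvInternalFrom t 0).map (· + (g.length : Int)) := by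
  unfold pvInternalFrom
  rw [pv_zip_adj_append g t hg ht, PySem.List.enumerate_append, List.filterMap_append,
      PySem.List.enumerate_cons, List.filterMap_cons]
  have h1 : (PySem.List.enumerate (g.zip g.tail) 0).filterMap
      (fun ip => if 20 < ip.2.2 - ip.2.1 then some (ip.1 + 1) else none) = [] :=
    pv_internal_nil g 0 hch
  rw [h1]
  simp only [List.nil_append]
  rw [if_pos (by simpa using hbd)]
  have hg1 : 1 ≤ g.length := by
    rcases g with _ | _
    · exact absurd rfl hg
    · simp
  have hz : (g.zip g.tail).length = g.length - 1 := by
    rcases g with _ | ⟨a, t'⟩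
    · simp
    · simp [List.length_zip]
  rw [show ((g.zip g.tail).length : Int) = (g.length : Int) - 1 by omega,
      show (0 : Int) + ((g.length : Int) - 1) + 1 = (g.length : Int) by ring]
  show (g.length : Int) :: pvInternalFrom t (g.length : Int)
      = (g.length : Int) :: (pvInternalFrom t 0).map (fun x => x + (g.length : Int))
  rw [pv_internal_shift t (g.length : Int)]

-- every cut position is nonnegative
lemma pv_internal_nonneg (t : List Int) (c : Int) (hc : c ∈ pvInternalFrom t 0) : 0 ≤ c := by
  unfold pvInternalFrom at hc
  obtain ⟨ip, hip, hc'⟩ := List.mem_filterMap.mp hc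
  obtain ⟨j, hj, rfl⟩ := (PySem.List.mem_enumerate_iff _ _ _).mp hip
  split_ifs at hc' with h
  · simp only [Option.some.injEq] at hc'
    omega

lemma pv_cuts_nonneg (t : List Int) (c : Int)
    (hc : c ∈ (0 : Int) :: pvInternalFrom t 0 ++ [(t.length : Int)]) : 0 ≤ c := by
  rcases List.mem_cons.mp hc with rfl | hc
  · omega
  rcases List.mem_append.mp hc with hc | hc
  · exact pv_internal_nonneg t c hc
  · simp at hc; omega

-- the segment computation of B recovers the reference grouping
lemma pv_segs_eq (gs : List (List Int)) (hne : gs ≠ [])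
    (hmem : ∀ g ∈ gs, g ≠ [])
    (hch : ∀ g ∈ gs, List.IsChain (fun a b => b - a ≤ 20) g)
    (hbd : List.IsChain (fun g g' => 20 < g'.headD 0 - g.getLastD 0) gs) :
    pvSegs gs.flatten = gs := by
  induction gs with
  | nil => exact absurd rfl hne
  | cons g gs ih =>
    cases gs with
    | nil =>
      have hg : g ≠ [] := hmem g (by simp)
      unfold pvSegs
      rw [List.flatten_cons, List.flatten_nil, List.append_nil]
      rw [pv_internal_nil g 0 (hch g (by simp))]
      simp [PySem.List.slice_zero_start, PySem.List.slice_to_natCast]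
    | cons g' gs' =>
      have hg : g ≠ [] := hmem g (by simp)
      have hg' : g' ≠ [] := hmem g' (by simp)
      have ht : (g' :: gs').flatten ≠ [] := by
        rcases List.exists_cons_of_ne_nil hg' with ⟨b, t', rfl⟩
        simp
      have hhead : (g' :: gs').flatten.headD 0 = g'.headD 0 := by
        rcases List.exists_cons_of_ne_nil hg' with ⟨b, t', rfl⟩
        simp
      have hbd1 : 20 < (g' :: gs').flatten.headD 0 - g.getLastD 0 := by
        rw [hhead]
        exact (List.isChain_cons_cons.mp hbd).1
      have ihres := ih (by simp)
        (fun h hh => hmem h (List.mem_cons_of_mem _ hh))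
        (fun h hh => hch h (List.mem_cons_of_mem _ hh))
        (List.isChain_cons_cons.mp hbd).2
      rw [List.flatten_cons]
      unfold pvSegs at ihres ⊢
      rw [pv_internal_append g (g' :: gs').flatten hg ht (hch g (by simp)) hbd1]
      set T := (g' :: gs').flatten with hT
      set f : Int → Int := fun x => x + (g.length : Int) with hf
      set rest : List Int := pvInternalFrom T 0 ++ [(T.length : Int)] with hrest
      have hlenT : ((g ++ T).length : Int) = (T.length : Int) + (g.length : Int) := by
        simp [List.length_append]; ring
      -- new cuts = 0 :: (old cuts mapped by f)
      have hcuts : ((g.length : Int) :: (pvInternalFrom T 0).map f) ++ [((g ++ T).length : Int)]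
          = ((0 : Int) :: rest).map f := by
        simp only [hrest, List.map_cons, List.map_append, List.map_nil, List.cons_append, hf]
        rw [hlenT]
        simp
      rw [show ((0:Int) :: ((g.length : Int) :: (pvInternalFrom T 0).map f)
            ++ [((g ++ T).length : Int)])
          = (0:Int) :: (((g.length : Int) :: (pvInternalFrom T 0).map f)
            ++ [((g ++ T).length : Int)]) by simp, hcuts]
      -- pair list of the new cuts
      have hzip : ((0 : Int) :: ((0 : Int) :: rest).map f).zip (((0 : Int) :: rest).map f)
          = (0, (g.length : Int)) ::
            (((0 : Int) :: rest).zip rest).map (fun p => (f p.1, f p.2)) := by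
        have hz2 : (((0 : Int) :: rest).map f).zip (rest.map f)
            = (((0 : Int) :: rest).zip rest).map (Prod.map f f) :=
          List.zip_map
        simp only [List.map_cons] at hz2
        simp only [List.map_cons, List.zip_cons_cons]
        rw [hz2]
        simp only [hf, zero_add]
        rfl
      simp only [List.tail_cons]
      rw [hzip]
      simp only [List.map_cons, List.map_map]
      congr 1
      · -- first segment: slice (g ++ T) 0 |g| = g
        rw [PySem.List.slice_zero_start, PySem.List.slice_to_natCast]
        simp
      · -- remaining segments: shift by |g| lands in T
        rw [← ihres]
        apply List.map_congr_left
        intro p hp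
        have h1 : p.1 ∈ (0 : Int) :: rest := (List.of_mem_zip hp).1
        have h2 : p.2 ∈ (0 : Int) :: rest := List.mem_cons_of_mem _ (List.of_mem_zip hp).2
        have hp1 : 0 ≤ p.1 := pv_cuts_nonneg T p.1 (by simpa [hrest] using h1)
        have hp2 : 0 ≤ p.2 := pv_cuts_nonneg T p.2 (by simpa [hrest] using h2)
        simp only [Function.comp, hf]
        rw [PySem.List.slice_toNat _ (by omega) (by omega),
            PySem.List.slice_toNat _ hp1 hp2]
        have e1 : (p.1 + (g.length : Int)).toNat = p.1.toNat + g.length := by omega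
        have e2 : (p.2 + (g.length : Int)).toNat = p.2.toNat + g.length := by omega
        rw [e1, e2]
        have hdrop : (g ++ T).drop (p.1.toNat + g.length) = T.drop p.1.toNat := by
          rw [List.drop_append]
          rw [List.drop_eq_nil_of_le (by omega)]
          simp
        rw [hdrop]
        congr 1
        omega

-- within a run, A's final abs-check holds
lemma pv_final_check (lines : List Int)
    (hchain : List.IsChain (fun a b => 0 ≤ b - a ∧ b - a ≤ 20) lines)
    (hlen : 2 ≤ lines.length) :
    ((PySem.List.pyGet? lines (-2)).getD 0 - (PySem.List.pyGet? lines (-1)).getD 0).natAbs ≤ 20 := by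
  rw [PySem.List.pyGet?_neg_ofNat lines 2 (by omega) (by omega),
      PySem.List.pyGet?_neg_ofNat lines 1 (by omega) (by omega)]
  have h1 : lines.length - 2 < lines.length := by omega
  have h2 : lines.length - 1 < lines.length := by omega
  have hc := List.isChain_iff_getElem.mp hchain (lines.length - 2) (by omega)
  have e : lines.length - 1 = lines.length - 2 + 1 := by omega
  rw [List.getElem?_eq_getElem h1, e, List.getElem?_eq_getElem (by omega)]
  simp only [Option.getD_some]
  omega

-- A's fold produces exactly the filtered reference grouping
lemma pv_mainA (xs : List Int) : ∀ (cur : List Int) (chunks : List (Int × Int)),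
    cur ≠ [] →
    List.IsChain (fun a b => 0 ≤ b - a ∧ b - a ≤ 20) cur →
    List.IsChain (· ≤ ·) (cur.getLastD 0 :: xs) →
    pvFinishA (xs.foldl pvStepA (chunks, cur)) = chunks ++ pvEmitG (pvRuns cur xs) := by
  induction xs with
  | nil =>
    intro cur chunks hne hchain _
    simp only [List.foldl_nil, pvFinishA, pvRuns, pvEmitG, List.filterMap_cons,
      List.filterMap_nil]
    by_cases h5 : 5 ≤ cur.length
    · rw [if_pos h5, if_pos (pv_final_check cur hchain (by omega)), if_pos h5]
    · rw [if_neg h5, if_neg h5]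
      simp
  | cons x xs ih =>
    intro cur chunks hne hchain hsort
    have hlast : cur.getLast? = some (cur.getLastD 0) := by
      rw [List.getLastD_eq_getLast?]
      obtain ⟨y, hy⟩ := Option.isSome_iff_exists.mp (List.getLast?_isSome.mpr hne)
      rw [hy]; rfl
    have hlx : cur.getLastD 0 ≤ x := (List.isChain_cons_cons.mp hsort).1
    simp only [List.foldl_cons, pvRuns]
    split_ifs with hgap
    · -- extend the current run
      have hA : pvStepA (chunks, cur) x = (chunks, cur ++ [x]) := by
        simp only [pvStepA, hlast]
        rw [if_neg (by omega)]
      rw [hA]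
      apply ih (cur ++ [x]) chunks (by simp)
      · refine List.IsChain.append hchain (by simp) ?_
        intro a ha b hb
        simp only [List.head?_cons, Option.mem_def, Option.some.injEq] at hb
        have hga : cur.getLast? = some a := Option.mem_def.mp ha
        have ha' : cur.getLastD 0 = a := by rw [hlast] at hga; exact (Option.some.injEq _ _).mp hga
        subst hb
        exact ⟨by omega, by omega⟩
      · have : (cur ++ [x]).getLastD 0 = x := by simp
        rw [this]
        exact (List.isChain_cons_cons.mp hsort).2
    · -- flush the run and start a new one
      have hA : pvStepA (chunks, cur) x
          = ((if 5 ≤ cur.length then chunks ++ [(cur.headD 0, cur.getLastD 0)] else chunks),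
             [x]) := by
        simp only [pvStepA, hlast]
        rw [if_pos (by omega)]
      rw [hA]
      rw [ih [x] _ (by simp) (by simp) (by simpa using (List.isChain_cons_cons.mp hsort).2)]
      simp only [pvEmitG, List.filterMap_cons]
      split_ifs with h5
      · simp
      · simp

-- B's port equals the segment pipeline on the sorted list (definitional)
lemma pv_alt_eq (all_lines : List Int) :
    detect_chunks_alt all_lines
      = pvEmitG (pvSegs (PySem.List.sorted all_lines (fun x => x) false)) := rfl

-- ===== VERDICT (by name: the statement is the Claim_ definition above) =====
theorem detect_chunks_spec : Claim_equal_detect_chunks := by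
  intro all_lines _
  unfold Spec_detect_chunks detect_chunks
  rw [pv_alt_eq]
  cases hs : PySem.List.sorted all_lines (fun x => x) false with
  | nil => rfl
  | cons x rest =>
    have hpw : (PySem.List.sorted all_lines (fun x => x) false).Pairwise (fun a b => a ≤ b) :=
      PySem.List.sorted_pairwise all_lines (fun x => x)
    rw [hs] at hpw
    have hchain : List.IsChain (· ≤ ·) (x :: rest) := List.isChain_iff_pairwise.mpr hpw
    have hsegs : pvSegs (x :: rest) = pvRuns [x] rest := by
      rw [show (x :: rest) = (pvRuns [x] rest).flatten from (pvRuns_flatten rest [x]).symm]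
      exact pv_segs_eq _ (pvRuns_ne_nil _ _) (pvRuns_ne_nil_mem _ _ (by simp))
        (pvRuns_chain _ _ (by simp) (by simp)) (pvRuns_boundary _ _ (by simp))
    simp only [List.foldl_cons]
    have hA0 : pvStepA ([], []) x = ([], [x]) := by simp [pvStepA]
    rw [hA0, pv_mainA rest [x] [] (by simp) (by simp) (by simpa using hchain), hsegs]
    simp
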